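-- pv_equiv track=rewrite | github.com/bchungg/INST126draftfinal | analysis.py | classify_roll
-- ===== SOURCE A (Python) =====
-- def classify_roll(roll):
--     """Given a list/array of 3 dice, return a label describing the pattern."""
--     # work with 1–11 only; treat 12 as wild but here we just keep it as 12
--     values = sorted(int(v) for v in roll)
--     a, b, c = values
--
--     # triple
--     if a == b == c:
--         return "three of a kind"
--
--     # pair
--     if a == b or b == c:
--         # it is possible to also be part of a run, but we label as pair here
--         return "pair"
--
--     # run: strictly consecutive numbers
--     if b == a + 1 and c == b + 1:
--         return "run"
--
--     return "no combo"
-- ===== SOURCE B (Python) =====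
-- def classify_roll(roll):
--     """Given a list/array of 3 dice, return a label describing the pattern."""
--     x, y, z = (int(v) for v in roll)
--     freq = {}
--     for v in (x, y, z):
--         freq[v] = freq.get(v, 0) + 1
--     top = max(freq.values())
--     if top == 3:
--         return "three of a kind"
--     if top == 2:
--         return "pair"
--     lo = min(x, y, z)
--     return "run" if {x, y, z} == {lo, lo + 1, lo + 2} else "no combo"
-- ===== Notes on version B (the rewrite author's own statement) =====
-- stated objective: alternative
-- what changed: B never sorts: it builds a frequency dictionary over the three values and branches on the maximum multiplicity (3/2/1), testing a run by comparing {x,y,z} with the set {min, min+1, min+2}, instead of A's sort followed by adjacent equality/successor comparisons.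
import Mathlib
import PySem

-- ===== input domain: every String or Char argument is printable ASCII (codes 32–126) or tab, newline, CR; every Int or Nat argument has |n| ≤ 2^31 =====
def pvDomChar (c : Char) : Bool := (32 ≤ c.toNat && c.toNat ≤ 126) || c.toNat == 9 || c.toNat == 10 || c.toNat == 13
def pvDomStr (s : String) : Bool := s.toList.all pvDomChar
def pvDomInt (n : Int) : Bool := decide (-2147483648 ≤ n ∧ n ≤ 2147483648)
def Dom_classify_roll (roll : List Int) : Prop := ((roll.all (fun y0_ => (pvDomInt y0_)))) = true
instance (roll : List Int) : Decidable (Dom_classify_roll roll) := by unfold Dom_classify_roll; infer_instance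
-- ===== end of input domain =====

-- B never sorts: it counts multiplicities in a dict and branches on the maximum count,
-- testing a run by set comparison with {min, min+1, min+2} (alternative algorithm; same cost).


-- ===== PORT A =====
def classify_roll (roll : List Int) : String :=
  let values := PySem.List.sorted roll (fun v => v) false
  match values with
  | [a, b, c] =>
    if a = b ∧ b = c then "three of a kind"
    else if a = b ∨ b = c then "pair"
    else if b = a + 1 ∧ c = b + 1 then "run"
    else "no combo"
  | _ => ""   -- Python raises ValueError on unpacking; excluded by Pre_

-- ===== PORT B =====
-- body of Source B after the 'x, y, z = …' unpack (a named helper so the proofs can reuse it)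
def bBody (x y z : Int) : String :=
  let freq := [x, y, z].foldl (fun d v => d.insert v (d.getD v 0 + 1)) PySem.Dict.empty
  let top := (PySem.List.max? freq.values (fun t => t)).getD 0   -- max(freq.values()); freq nonempty
  if top = 3 then "three of a kind"
  else if top = 2 then "pair"
  else
    let lo := min x (min y z)
    if PySem.Set.equal (PySem.Set.ofList [x, y, z]) (PySem.Set.ofList [lo, lo + 1, lo + 2])
    then "run" else "no combo"

def classify_roll_alt (roll : List Int) : String :=
  -- the 'x, y, z = …' unpack: exactly three elements (ValueError otherwise; excluded by Pre_)
  if roll.length = 3 then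
    bBody (PySem.List.pyGetD roll 0 0) (PySem.List.pyGetD roll 1 0) (PySem.List.pyGetD roll 2 0)
  else ""

-- ===== PRECONDITION & SPEC =====
-- Pre_ excludes lists whose length is not 3, on which A raises ValueError (tuple unpacking).
def Pre_classify_roll (roll : List Int) : Prop := roll.length = 3
instance (roll : List Int) : Decidable (Pre_classify_roll roll) := by unfold Pre_classify_roll; infer_instance
def pvWitness_classify_roll : List Int := [3, 1, 2]

def Spec_classify_roll (roll : List Int) (out : String) : Prop := out = classify_roll_alt roll
instance (roll : List Int) (out : String) : Decidable (Spec_classify_roll roll out) := by unfold Spec_classify_roll; infer_instance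

-- ===== CLAIM (what is proved, stated in full; the proofs are below) =====
def Claim_equal_classify_roll : Prop := ∀ (roll : List Int), Dom_classify_roll roll → Pre_classify_roll roll → Spec_classify_roll roll (classify_roll roll)

-- ===== LEMMAS AND PROOFS =====

-- Set.equal only depends on the members of its left argument.
lemma setEqCongr (s s' t : List Int) (h : ∀ u, u ∈ s ↔ u ∈ s') :
    PySem.Set.equal s t = PySem.Set.equal s' t := by
  rw [Bool.eq_iff_iff, PySem.Set.equal_iff, PySem.Set.equal_iff]
  constructor <;> intro hq u <;> [rw [← h u]; rw [h u]] <;> exact hq u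

-- B's body is invariant under swapping its first two arguments.
lemma bBody_swap12 (x y z : Int) : bBody x y z = bBody y x z := by
  by_cases hxy : x = y
  · subst hxy; rfl
  · by_cases hyz : y = z <;> by_cases hxz : x = z
    · subst hyz; subst hxz; simp at hxy
    · subst hyz
      simp [bBody, PySem.Dict.insert, PySem.Dict.getD, PySem.Dict.get?, PySem.Dict.empty,
            PySem.Dict.values, PySem.List.max?, hxy, Ne.symm hxy]
    · subst hxz
      simp [bBody, PySem.Dict.insert, PySem.Dict.getD, PySem.Dict.get?, PySem.Dict.empty,
            PySem.Dict.values, PySem.List.max?, hxy, Ne.symm hxy]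
    · have hmin : min x (min y z) = min y (min x z) := by omega
      have hset := setEqCongr (PySem.Set.ofList [x, y, z]) (PySem.Set.ofList [y, x, z])
        (PySem.Set.ofList [min y (min x z), min y (min x z) + 1, min y (min x z) + 2])
        (by intro u; simp [PySem.Set.mem_ofList]; tauto)
      simp only [bBody, hmin]
      simp [PySem.Dict.insert, PySem.Dict.getD, PySem.Dict.get?, PySem.Dict.empty,
            PySem.Dict.values, PySem.List.max?, hxy, hyz, hxz, Ne.symm hxy]
      rw [hset]

-- B's body is invariant under swapping its last two arguments.
lemma bBody_swap23 (x y z : Int) : bBody x y z = bBody x z y := by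
  by_cases hyz : y = z
  · subst hyz; rfl
  · by_cases hxy : x = y <;> by_cases hxz : x = z
    · subst hxy; subst hxz; simp at hyz
    · subst hxy
      simp [bBody, PySem.Dict.insert, PySem.Dict.getD, PySem.Dict.get?, PySem.Dict.empty,
            PySem.Dict.values, PySem.List.max?, hyz, Ne.symm hyz]
    · subst hxz
      simp [bBody, PySem.Dict.insert, PySem.Dict.getD, PySem.Dict.get?, PySem.Dict.empty,
            PySem.Dict.values, PySem.List.max?, hyz, Ne.symm hyz]
    · have hmin : min x (min y z) = min x (min z y) := by omega
      have hset := setEqCongr (PySem.Set.ofList [x, y, z]) (PySem.Set.ofList [x, z, y])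
        (PySem.Set.ofList [min x (min z y), min x (min z y) + 1, min x (min z y) + 2])
        (by intro u; simp [PySem.Set.mem_ofList]; tauto)
      simp only [bBody, hmin]
      simp [PySem.Dict.insert, PySem.Dict.getD, PySem.Dict.get?, PySem.Dict.empty,
            PySem.Dict.values, PySem.List.max?, hxy, hyz, hxz, Ne.symm hyz]
      rw [hset]

-- On a sorted triple a ≤ b ≤ c, A's comparison chain equals B's body.
lemma body_eq (a b c : Int) (hab : a ≤ b) (hbc : b ≤ c) :
    (if a = b ∧ b = c then "three of a kind"
     else if a = b ∨ b = c then "pair"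
     else if b = a + 1 ∧ c = b + 1 then "run"
     else "no combo") = bBody a b c := by
  by_cases h1 : a = b <;> by_cases h2 : b = c
  · subst h1 h2
    simp [bBody, PySem.Dict.insert, PySem.Dict.getD, PySem.Dict.get?, PySem.Dict.empty,
          PySem.Dict.values, PySem.List.max?]
  · subst h1
    simp [bBody, PySem.Dict.insert, PySem.Dict.getD, PySem.Dict.get?, PySem.Dict.empty,
          PySem.Dict.values, PySem.List.max?, h2]
  · subst h2
    simp [bBody, PySem.Dict.insert, PySem.Dict.getD, PySem.Dict.get?, PySem.Dict.empty,
          PySem.Dict.values, PySem.List.max?, h1]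
  · have h3 : a ≠ c := by omega
    have hmin : min a (min b c) = a := by omega
    by_cases hrun : b = a + 1 ∧ c = b + 1
    · obtain ⟨hb, hc⟩ := hrun
      subst hb; subst hc
      simp [bBody, PySem.Dict.insert, PySem.Dict.getD, PySem.Dict.get?, PySem.Dict.empty,
            PySem.Dict.values, PySem.List.max?, h1, h2, h3, PySem.Set.equal_iff]
      omega
    · have hne : PySem.Set.equal (PySem.Set.ofList [a, b, c])
          (PySem.Set.ofList [a, a + 1, a + 2]) ≠ true := by
        intro h
        rw [PySem.Set.equal_iff] at h
        have hb' := (h b).mp (by simp [PySem.Set.mem_ofList])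
        have hc' := (h c).mp (by simp [PySem.Set.mem_ofList])
        simp [PySem.Set.mem_ofList] at hb' hc'
        omega
      simp only [bBody, hmin]
      simp [PySem.Dict.insert, PySem.Dict.getD, PySem.Dict.get?, PySem.Dict.empty,
            PySem.Dict.values, PySem.List.max?, h1, h2, h3, hrun, hne]

-- A on [x,y,z] equals B, given a sorted rearrangement [p,q,r] and B's invariance bridge.
lemma main_case (x y z p q r : Int) (hperm : [p, q, r].Perm [x, y, z])
    (h1 : p ≤ q) (h2 : q ≤ r) (hb : bBody p q r = bBody x y z) :
    classify_roll [x, y, z] = classify_roll_alt [x, y, z] := by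
  have hs : PySem.List.sorted [x, y, z] (fun v => v) false = [p, q, r] :=
    PySem.List.sorted_id_eq_of_perm_of_pairwise _ _ hperm
      (by simp [List.pairwise_cons]; omega)
  have halt : classify_roll_alt [x, y, z] = bBody x y z := rfl
  simp only [classify_roll, hs, halt]
  rw [body_eq p q r h1 h2]
  exact hb

lemma main_triple (x y z : Int) : classify_roll [x, y, z] = classify_roll_alt [x, y, z] := by
  rcases le_total x y with h1 | h1 <;> rcases le_total y z with h2 | h2
  · exact main_case x y z x y z (List.Perm.refl _) h1 h2 rfl
  · rcases le_total x z with h3 | h3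
    · exact main_case x y z x z y (List.Perm.cons x (List.Perm.swap y z [])) h3 h2
        (bBody_swap23 x y z).symm
    · exact main_case x y z z x y
        ((List.Perm.swap x z [y]).trans (List.Perm.cons x (List.Perm.swap y z []))) h3 h1
        ((bBody_swap12 z x y).trans (bBody_swap23 x y z).symm)
  · rcases le_total x z with h3 | h3
    · exact main_case x y z y x z (List.Perm.swap x y [z]) h1 h3 (bBody_swap12 x y z).symm
    · exact main_case x y z y z x
        ((List.Perm.cons y (List.Perm.swap x z [])).trans (List.Perm.swap x y [z])) h2 h3
        ((bBody_swap23 y x z).symm.trans (bBody_swap12 x y z).symm)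
  · exact main_case x y z z y x
      ((List.Perm.swap y z [x]).trans
        ((List.Perm.cons y (List.Perm.swap x z [])).trans (List.Perm.swap x y [z]))) h2 h1
      ((bBody_swap12 z y x).trans ((bBody_swap23 y x z).symm.trans (bBody_swap12 x y z).symm))

-- ===== VERDICT (by name: the statement is the Claim_ definition above) =====
theorem classify_roll_spec : Claim_equal_classify_roll := by
  intro roll _ hpre
  unfold Pre_classify_roll at hpre
  unfold Spec_classify_roll
  match roll with
  | [x, y, z] => exact main_triple x y z
  | [] | [_] | [_, _] => simp at hpre
  | _ :: _ :: _ :: _ :: _ => simp at hpre
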